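-- pv_equiv track=rewrite | github.com/vdesmond/py-research-stuff | timeseries_plot.py | gen_repeating
-- ===== SOURCE A (Python) =====
-- def gen_repeating(df):
--     i = 0
--     while i < len(df):
--         j = i
--         while j < len(df) and df[j] == df[i]:
--             j += 1
--         yield (df[i], i, j - 1)
--         i = j
-- ===== SOURCE B (Python) =====
-- def gen_repeating(df):
--     if not df:
--         return
--     value = df[0]
--     start = 0
--     for pos, x in enumerate(df):
--         if x != value:
--             yield (value, start, pos - 1)
--             value = x
--             start = pos
--     yield (value, start, len(df) - 1)
-- ===== Notes on version B (the rewrite author's own statement) =====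
-- stated objective: simpler
-- what changed: Replaces A's nested while-loops with explicit index arithmetic by a single forward pass over enumerate(df) that flushes the current run whenever the value changes, plus one final flush.
import Mathlib
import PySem

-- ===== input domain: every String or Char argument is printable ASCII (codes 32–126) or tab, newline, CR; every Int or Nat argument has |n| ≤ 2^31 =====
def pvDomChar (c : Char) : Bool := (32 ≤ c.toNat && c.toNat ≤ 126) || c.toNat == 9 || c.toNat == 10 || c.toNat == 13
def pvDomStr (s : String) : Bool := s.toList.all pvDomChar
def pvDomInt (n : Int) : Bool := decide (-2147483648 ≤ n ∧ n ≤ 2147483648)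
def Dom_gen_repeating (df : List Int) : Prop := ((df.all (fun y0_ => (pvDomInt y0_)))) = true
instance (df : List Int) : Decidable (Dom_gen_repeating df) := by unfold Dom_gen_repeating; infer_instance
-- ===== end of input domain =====

-- B replaces A's nested while-loops by a single pass that flushes a run when the value changes; same O(n) cost, simpler shape.

-- ===== PORT A =====
-- inner 'while j < len(df) and df[j] == df[i]' scan: advances j while the value matches vi
-- (fuel = len(df) only makes the loop structurally total; it never runs out on the call below)
def genRepScan (df : List Int) (vi : Int) : Nat → Nat → Nat
  | 0, j => j
  | fuel + 1, j =>
    if h : j < df.length then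
      if df[j] = vi then genRepScan df vi fuel (j + 1) else j
    else j

-- outer 'while i < len(df)' loop, yielding (df[i], i, j-1) and setting i := j
def genRepLoop (df : List Int) : Nat → Nat → List (Int × Int × Int)
  | 0, _ => []
  | fuel + 1, i =>
    if h : i < df.length then
      let j := genRepScan df df[i] df.length i
      ((df[i], (i : Int), (j : Int) - 1)) :: genRepLoop df fuel j
    else []

def gen_repeating (df : List Int) : List (Int × Int × Int) := genRepLoop df df.length 0

-- ===== PORT B =====
-- the 'for pos, x in enumerate(df)' loop body; state = (value, start, yielded-so-far)
def genRepAltStep (st : Int × Int × List (Int × Int × Int)) (px : Int × Int) :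
    Int × Int × List (Int × Int × Int) :=
  if px.2 ≠ st.1 then (px.2, px.1, st.2.2 ++ [(st.1, st.2.1, px.1 - 1)]) else st

def gen_repeating_alt (df : List Int) : List (Int × Int × Int) :=
  match df with
  | [] => []
  | d0 :: _ =>
    let r := (PySem.List.enumerate df 0).foldl genRepAltStep (d0, 0, [])
    r.2.2 ++ [(r.1, r.2.1, (df.length : Int) - 1)]

-- ===== PRECONDITION & SPEC =====
def Spec_gen_repeating (df : List Int) (out : List (Int × Int × Int)) : Prop := out = gen_repeating_alt df
instance (df : List Int) (out : List (Int × Int × Int)) : Decidable (Spec_gen_repeating df out) := by unfold Spec_gen_repeating; infer_instance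

-- ===== CLAIM (what is proved, stated in full; the proofs are below) =====
def Claim_equal_gen_repeating : Prop := ∀ (df : List Int), Dom_gen_repeating df → Spec_gen_repeating df (gen_repeating df)

-- ===== LEMMAS AND PROOFS =====

-- common reference shape: the list of runs of l, indices starting at k
def genRepRuns : List Int → Int → List (Int × Int × Int)
  | [], _ => []
  | v :: rest, k =>
    let t := rest.takeWhile (· == v)
    (v, k, k + t.length) :: genRepRuns (rest.dropWhile (· == v)) (k + t.length + 1)
termination_by l _ => l.length
decreasing_by
  simpa using Nat.lt_succ_of_le (List.length_dropWhile_le _ _)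

theorem scan_eq (df : List Int) (v : Int) (fuel j : Nat) (hf : df.length - j ≤ fuel) :
    genRepScan df v fuel j = j + ((df.drop j).takeWhile (· == v)).length := by
  induction fuel generalizing j with
  | zero =>
    rw [genRepScan, List.drop_eq_nil_of_le (by omega)]
    simp
  | succ fuel ih =>
    rw [genRepScan]
    split
    · next h =>
      rw [List.drop_eq_getElem_cons h, List.takeWhile_cons]
      split
      · next heq =>
        rw [ih (j + 1) (by omega)]
        simp [heq]; omega
      · next hne =>
        simp [hne]
    · next h =>
      rw [List.drop_eq_nil_of_le (by omega)]
      simp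

theorem drop_len_takeWhile (p : Int → Bool) (l : List Int) :
    l.drop (l.takeWhile p).length = l.dropWhile p := by
  induction l with
  | nil => rfl
  | cons x xs ih =>
    by_cases h : p x = true
    · rw [List.takeWhile_cons_of_pos h, List.dropWhile_cons_of_pos h,
        List.length_cons, List.drop_succ_cons, ih]
    · rw [List.takeWhile_cons_of_neg h, List.dropWhile_cons_of_neg h]; rfl

theorem a_side (df : List Int) (fuel i : Nat) (hf : df.length - i ≤ fuel) :
    genRepLoop df fuel i = genRepRuns (df.drop i) i := by
  induction fuel generalizing i with
  | zero =>
    rw [genRepLoop, List.drop_eq_nil_of_le (by omega), genRepRuns]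
  | succ fuel ih =>
    rw [genRepLoop]
    split
    · next h =>
      show (df[i], (i : Int), ((genRepScan df df[i] df.length i : Nat) : Int) - 1)
          :: genRepLoop df fuel (genRepScan df df[i] df.length i) = _
      rw [List.drop_eq_getElem_cons h, genRepRuns]
      have hsc : genRepScan df df[i] df.length i
          = i + 1 + ((df.drop (i+1)).takeWhile (· == df[i])).length := by
        rw [scan_eq df df[i] df.length i (by omega), List.drop_eq_getElem_cons h,
          List.takeWhile_cons]
        simp; omega
      have hlen : i + 1 + ((df.drop (i+1)).takeWhile (· == df[i])).length ≤ df.length := by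
        have h1 := (List.takeWhile_sublist (p := (· == df[i])) (l := df.drop (i+1))).length_le
        have h2 := List.length_drop (l := df) (i := i+1)
        omega
      rw [hsc]
      rw [ih (i + 1 + ((df.drop (i+1)).takeWhile (· == df[i])).length) (by omega)]
      have h2 : df.drop (i + 1 + ((df.drop (i+1)).takeWhile (· == df[i])).length)
          = (df.drop (i+1)).dropWhile (· == df[i]) := by
        rw [← List.drop_drop (i := ((df.drop (i+1)).takeWhile (· == df[i])).length)
            (j := i + 1) (l := df), drop_len_takeWhile]
      rw [h2]
      congr 1
      · simp only [Prod.mk.injEq]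
        refine ⟨by simp, by simp, by push_cast; omega⟩
      · congr 1
        push_cast; omega
    · next h =>
      rw [List.drop_eq_nil_of_le (by omega), genRepRuns]

theorem b_gen (l : List Int) (k v s : Int) (acc : List (Int × Int × Int)) :
    (let r := (PySem.List.enumerate l k).foldl genRepAltStep (v, s, acc)
     r.2.2 ++ [(r.1, r.2.1, k + (l.length : Int) - 1)]) =
      acc ++ (v, s, k + ((l.takeWhile (· == v)).length : Int) - 1)
        :: genRepRuns (l.dropWhile (· == v)) (k + (l.takeWhile (· == v)).length) := by
  induction l generalizing k v s acc with
  | nil => simp [PySem.List.enumerate, genRepRuns]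
  | cons x xs ih =>
    show ((PySem.List.enumerate (x :: xs) k).foldl genRepAltStep (v, s, acc)).2.2 ++ _ = _
    rw [PySem.List.enumerate_cons, List.foldl_cons]
    by_cases hxv : x = v
    · subst hxv
      rw [show genRepAltStep (x, s, acc) (k, x) = (x, s, acc) by simp [genRepAltStep]]
      rw [show k + (((x :: xs).length : Nat) : Int) - 1
          = (k + 1) + ((xs.length : Nat) : Int) - 1 by simp only [List.length_cons]; push_cast; ring]
      rw [ih (k + 1) x s acc,
        List.takeWhile_cons_of_pos (by simp), List.dropWhile_cons_of_pos (by simp)]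
      simp only [List.length_cons]
      push_cast
      ring_nf
    · rw [show genRepAltStep (v, s, acc) (k, x) = (x, k, acc ++ [(v, s, k - 1)]) by
        simp [genRepAltStep, hxv]]
      rw [show k + (((x :: xs).length : Nat) : Int) - 1
          = (k + 1) + ((xs.length : Nat) : Int) - 1 by simp only [List.length_cons]; push_cast; ring]
      rw [ih (k + 1) x k (acc ++ [(v, s, k - 1)]),
        List.takeWhile_cons_of_neg (by simp [hxv]), List.dropWhile_cons_of_neg (by simp [hxv]),
        List.append_assoc, genRepRuns]
      simp only [List.length_nil, List.cons_append, List.nil_append]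
      push_cast
      ring_nf

theorem b_side (df : List Int) : gen_repeating_alt df = genRepRuns df 0 := by
  match df with
  | [] => rw [genRepRuns]; rfl
  | d0 :: rest =>
    show (let r := (PySem.List.enumerate (d0 :: rest) 0).foldl genRepAltStep (d0, 0, [])
          r.2.2 ++ [(r.1, r.2.1, (((d0 :: rest).length : Nat) : Int) - 1)]) = _
    rw [show (((d0 :: rest).length : Nat) : Int) - 1
        = 0 + (((d0 :: rest).length : Nat) : Int) - 1 by ring]
    rw [b_gen (d0 :: rest) 0 d0 0 [],
      List.takeWhile_cons_of_pos (by simp), List.dropWhile_cons_of_pos (by simp),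
      genRepRuns]
    simp only [List.length_cons, List.nil_append]
    push_cast
    ring_nf

-- ===== VERDICT (by name: the statement is the Claim_ definition above) =====
theorem gen_repeating_spec : Claim_equal_gen_repeating := by
  intro df _
  unfold Spec_gen_repeating gen_repeating
  rw [b_side, a_side df df.length 0 (by omega)]; simp
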